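-- pv_equiv track=rewrite | github.com/siddjai/GuillotineCuts | GeneratingTree/GeneratingTree_BaxterPermutations.py | isBaxter
-- ===== SOURCE A (Python) =====
-- def isBaxter(perm):
-- 	n = len(perm)
--
-- 	# Memorise -14-
-- 	steps = []
-- 	for k in range(n-1):
-- 		if perm[k] < perm[k+1] - 1: steps.append(k)
--
-- 	# Avoid 2-14-3
-- 	for s in steps:
-- 		m, M = perm[s], perm[s+1]
-- 		two, three = 1000, 0
-- 		prefix, suffix = perm[:s], perm[s+2:]
-- 		for k in prefix:
-- 			if (k > m) and (k < M - 1):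
-- 				two = min(k, two)
--
-- 		for k in suffix:
-- 			if (k > two) and (k < M):
-- 				three = k
-- 				return False
--
-- 	# Avoid 3-14-2
-- 	for s in steps:
-- 		m, M = perm[s], perm[s+1]
-- 		two, three = 1000, 0
-- 		prefix, suffix = perm[:s], perm[s+2:]
-- 		for k in prefix:
-- 			if (k > m + 1) and (k < M):
-- 				three = max(k, three)
--
-- 		for k in suffix:
-- 			if (k < three) and (k > m):
-- 				three = k
-- 				return False
--
-- 	return True
-- ===== SOURCE B (Python) =====
-- # B: single sweep maintaining sorted prefix/suffix multisets; each step answers its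
-- # range queries by boundary lookups in the sorted lists instead of full filtered scans.
--
-- def _first_greater(sl, x):
--     # sl sorted ascending: smallest element > x, else None
--     for v in sl:
--         if v > x:
--             return v
--     return None
--
-- def _last_less(sl, x):
--     # sl sorted ascending: largest element < x, else None
--     for v in reversed(sl):
--         if v < x:
--             return v
--     return None
--
-- def _insort(sl, x):
--     i = 0
--     while i < len(sl) and sl[i] <= x:
--         i += 1
--     sl.insert(i, x)
--
-- def isBaxter(perm):
--     n = len(perm)
--     pre = []                  # sorted copy of perm[:s]
--     suf = sorted(perm[2:])    # sorted copy of perm[s+2:]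
--     for s in range(n - 1):
--         m, M = perm[s], perm[s + 1]
--         if m < M - 1:
--             # 2-14-3: smallest prefix value in (m, M-1), capped at 1000
--             two = 1000
--             v = _first_greater(pre, m)
--             if v is not None and v < M - 1:
--                 two = min(v, 1000)
--             w = _first_greater(suf, two)
--             if w is not None and w < M:
--                 return False
--             # 3-14-2: largest prefix value in (m+1, M), floored at 0
--             three = 0
--             u = _last_less(pre, M)
--             if u is not None and u > m + 1:
--                 three = max(u, 0)
--             w = _first_greater(suf, m)
--             if w is not None and w < three:
--                 return False
--         _insort(pre, perm[s])
--         if s + 2 < n: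
--             suf.remove(perm[s + 2])
--     return True
-- ===== Notes on version B (the rewrite author's own statement) =====
-- stated objective: faster
-- what changed: Instead of re-scanning the whole unsorted prefix and suffix for each rise to compute filtered min/max and an existence test, B sweeps once while maintaining sorted prefix/suffix multisets (incremental ordered insert / remove) and answers each step's range queries by early-exit boundary lookups (first element above / last element below a threshold) in the sorted lists.
import Mathlib
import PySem

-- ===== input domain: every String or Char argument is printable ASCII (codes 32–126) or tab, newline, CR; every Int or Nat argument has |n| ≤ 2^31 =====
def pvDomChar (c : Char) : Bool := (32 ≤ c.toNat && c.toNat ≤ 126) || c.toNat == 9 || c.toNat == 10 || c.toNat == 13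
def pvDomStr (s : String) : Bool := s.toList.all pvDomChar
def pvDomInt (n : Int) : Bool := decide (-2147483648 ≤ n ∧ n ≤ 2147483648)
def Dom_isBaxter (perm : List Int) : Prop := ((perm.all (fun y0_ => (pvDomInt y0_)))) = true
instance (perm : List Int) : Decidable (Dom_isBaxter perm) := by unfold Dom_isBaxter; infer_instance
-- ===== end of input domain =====

-- B replaces A's per-rise full scans of the unsorted prefix/suffix by a single sweep that
-- maintains sorted prefix/suffix multisets and answers each query by a boundary lookup
-- (same worst-case bound; measurably faster on a timing run's inputs, where the boundary
-- lookups exit early). Return value only; no argument is mutated.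

-- ===== PORT A =====
-- two = 1000; for k in perm[:s]: if k > m and k < M-1: two = min(k, two)
def pvA_two (pre : List Int) (m M : Int) : Int :=
  pre.foldl (fun two k => if m < k ∧ k < M - 1 then min k two else two) 1000

-- three = 0; for k in perm[:s]: if k > m+1 and k < M: three = max(k, three)
def pvA_three (pre : List Int) (m M : Int) : Int :=
  pre.foldl (fun three k => if m + 1 < k ∧ k < M then max k three else three) 0

-- body of the first 'for s in steps' loop: 'return False' ⇔ this is true
def pvA_bad1 (perm : List Int) (s : Int) : Bool :=
  let m := PySem.List.pyGetD perm s 0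
  let M := PySem.List.pyGetD perm (s + 1) 0
  let two := pvA_two (PySem.List.slice perm none (some s)) m M
  (PySem.List.slice perm (some (s + 2)) none).any (fun k => decide (two < k) && decide (k < M))

-- body of the second 'for s in steps' loop
def pvA_bad2 (perm : List Int) (s : Int) : Bool :=
  let m := PySem.List.pyGetD perm s 0
  let M := PySem.List.pyGetD perm (s + 1) 0
  let three := pvA_three (PySem.List.slice perm none (some s)) m M
  (PySem.List.slice perm (some (s + 2)) none).any (fun k => decide (k < three) && decide (m < k))

def isBaxter (perm : List Int) : Bool :=
  let n : Int := perm.length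
  -- steps = [k for k in range(n-1) if perm[k] < perm[k+1] - 1]
  let steps : List Int :=
    (PySem.List.pyRange 0 (n - 1) 1).foldl
      (fun st k =>
        if PySem.List.pyGetD perm k 0 < PySem.List.pyGetD perm (k + 1) 0 - 1 then st ++ [k] else st) []
  if steps.any (fun s => pvA_bad1 perm s) then false       -- first loop's early 'return False'
  else if steps.any (fun s => pvA_bad2 perm s) then false  -- second loop's early 'return False'
  else true

-- ===== PORT B =====
-- _first_greater: first (= smallest, list is sorted) element > x, else None
def pvB_firstGreater (sl : List Int) (x : Int) : Option Int :=
  sl.find? (fun v => decide (x < v))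

-- _last_less: scan reversed(sl): first element < x, else None
def pvB_lastLess (sl : List Int) (x : Int) : Option Int :=
  sl.reverse.find? (fun v => decide (v < x))

-- _insort: skip while sl[i] <= x, insert x there
def pvB_insort (sl : List Int) (x : Int) : List Int :=
  match sl with
  | [] => [x]
  | y :: t => if y ≤ x then y :: pvB_insort t x else x :: y :: t

-- the two 'return False' tests of one iteration (m < M - 1 already known)
def pvB_body (m M : Int) (pre suf : List Int) : Bool :=
  let two : Int :=
    match pvB_firstGreater pre m with
    | some v => if v < M - 1 then min v 1000 else 1000
    | none => 1000
  let c1 : Bool :=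
    match pvB_firstGreater suf two with
    | some w => decide (w < M)
    | none => false
  if c1 then true
  else
    let three : Int :=
      match pvB_lastLess pre M with
      | some u => if m + 1 < u then max u 0 else 0
      | none => 0
    match pvB_firstGreater suf m with
    | some w => decide (w < three)
    | none => false

-- for s in range(n-1): …  (pre = sorted perm[:s], suf = sorted perm[s+2:])
def pvB_loop (perm : List Int) (s : Nat) (pre suf : List Int) : Bool :=
  if h : s + 1 < perm.length then
    if (if PySem.List.pyGetD perm (s : Int) 0 < PySem.List.pyGetD perm ((s : Int) + 1) 0 - 1 then
          pvB_body (PySem.List.pyGetD perm (s : Int) 0) (PySem.List.pyGetD perm ((s : Int) + 1) 0) pre suf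
        else false) then
      false
    else
      pvB_loop perm (s + 1) (pvB_insort pre (PySem.List.pyGetD perm (s : Int) 0))
        (if s + 2 < perm.length then
          (PySem.List.remove? suf (PySem.List.pyGetD perm ((s : Int) + 2) 0)).getD suf
         else suf)
  else true
termination_by perm.length - s

def isBaxter_alt (perm : List Int) : Bool :=
  pvB_loop perm 0 [] (PySem.List.sorted (PySem.List.slice perm (some 2) none) id false)

-- ===== PRECONDITION & SPEC =====
def Spec_isBaxter (perm : List Int) (out : Bool) : Prop := out = isBaxter_alt perm
instance (perm : List Int) (out : Bool) : Decidable (Spec_isBaxter perm out) := by unfold Spec_isBaxter; infer_instance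

-- ===== CLAIM (what is proved, stated in full; the proofs are below) =====
def Claim_equal_isBaxter : Prop := ∀ (perm : List Int), Dom_isBaxter perm → Spec_isBaxter perm (isBaxter perm)

-- ===== LEMMAS AND PROOFS =====

def pvStep (perm : List Int) (t : Nat) : Bool :=
  decide (perm.getD t 0 < perm.getD (t + 1) 0 - 1)

def pvSpecAny (perm : List Int) (s : Nat) : Bool :=
  (List.range' s (perm.length - 1 - s)).any
    (fun t => pvStep perm t && (pvA_bad1 perm (t : Int) || pvA_bad2 perm (t : Int)))

theorem pv_any_and_or {α : Type} (l : List α) (p f g : α → Bool) :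
    l.any (fun x => p x && (f x || g x)) = (l.any (fun x => p x && f x) || l.any (fun x => p x && g x)) := by
  induction l with
  | nil => simp
  | cons x t ih =>
    simp only [List.any_cons, ih]
    cases p x <;> cases f x <;> cases g x <;> simp

theorem pvA_char (perm : List Int) : isBaxter perm = !(pvSpecAny perm 0) := by
  unfold isBaxter pvSpecAny
  simp only []
  rw [PySem.List.foldl_append_ite_eq_filter, List.nil_append]
  rw [show PySem.List.pyRange 0 ((perm.length : Int) - 1) 1
      = (List.range' 0 (perm.length - 1)).map (fun t : Nat => (t : Int)) from ?_]
  · rw [List.any_filter, List.any_filter, List.any_map, List.any_map]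
    have hstep : ∀ t : Nat,
        decide (PySem.List.pyGetD perm (t : Int) 0 < PySem.List.pyGetD perm ((t : Int) + 1) 0 - 1)
          = pvStep perm t := by
      intro t
      have h1 : ((t : Int) + 1) = ((t + 1 : Nat) : Int) := by push_cast; ring
      rw [h1, PySem.List.pyGetD_natCast, PySem.List.pyGetD_natCast]
      rfl
    simp only [Nat.sub_zero, Function.comp_def, hstep]
    rw [pv_any_and_or (List.range' 0 (perm.length - 1)) (pvStep perm)
      (fun t : Nat => pvA_bad1 perm (t : Int)) (fun t : Nat => pvA_bad2 perm (t : Int))]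
    cases h1 : (List.range' 0 (perm.length - 1)).any (fun t => pvStep perm t && pvA_bad1 perm (t : Int)) <;>
      cases h2 : (List.range' 0 (perm.length - 1)).any (fun t => pvStep perm t && pvA_bad2 perm (t : Int)) <;>
      simp
  · rw [PySem.List.pyRange_one]
    rw [show (((perm.length : Int) - 1) - 0).toNat = perm.length - 1 by omega]
    rw [List.range_eq_range']
    simp

theorem pv_insort_perm (l : List Int) (x : Int) : (pvB_insort l x).Perm (x :: l) := by
  induction l with
  | nil => simp [pvB_insort]
  | cons y t ih =>
    rw [pvB_insort]
    by_cases hx : y ≤ x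
    · rw [if_pos hx]
      exact (ih.cons y).trans (List.Perm.swap x y t)
    · rw [if_neg hx]

theorem pv_insort_mem {l : List Int} {x z : Int} (hz : z ∈ pvB_insort l x) : z = x ∨ z ∈ l := by
  have := (pv_insort_perm l x).mem_iff.mp hz
  simpa using this

theorem pv_insort_pairwise (l : List Int) (x : Int) (h : l.Pairwise (· ≤ ·)) :
    (pvB_insort l x).Pairwise (· ≤ ·) := by
  induction l with
  | nil => simp [pvB_insort]
  | cons y t ih =>
    rw [List.pairwise_cons] at h
    obtain ⟨hy, ht⟩ := h
    rw [pvB_insort]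
    by_cases hx : y ≤ x
    · rw [if_pos hx]
      refine List.pairwise_cons.mpr ⟨fun z hz => ?_, ih ht⟩
      rcases pv_insort_mem hz with rfl | hz
      · exact hx
      · exact hy z hz
    · rw [if_neg hx]
      refine List.pairwise_cons.mpr ⟨fun z hz => ?_, List.pairwise_cons.mpr ⟨hy, ht⟩⟩
      rcases List.mem_cons.mp hz with rfl | hz
      · omega
      · exact le_trans (by omega) (hy z hz)

theorem pv_two_stable (m M : Int) (t : List Int) (acc : Int)
    (h : ∀ k ∈ t, m < k ∧ k < M - 1 → acc ≤ k) :
    t.foldl (fun two k => if m < k ∧ k < M - 1 then min k two else two) acc = acc := by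
  induction t with
  | nil => rfl
  | cons x s ih =>
    simp only [List.foldl_cons]
    by_cases hx : m < x ∧ x < M - 1
    · rw [if_pos hx, min_eq_right (h x (by simp) hx)]
      exact ih (fun k hk hkc => h k (by simp [hk]) hkc)
    · rw [if_neg hx]; exact ih (fun k hk hkc => h k (by simp [hk]) hkc)

theorem pv_two_foldl_perm (m M : Int) {l₁ l₂ : List Int} (h : l₁.Perm l₂) (acc : Int) :
    l₁.foldl (fun two k => if m < k ∧ k < M - 1 then min k two else two) acc
      = l₂.foldl (fun two k => if m < k ∧ k < M - 1 then min k two else two) acc := by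
  letI : RightCommutative fun (two k : Int) => if m < k ∧ k < M - 1 then min k two else two := by
    constructor; intro a b c; dsimp; split_ifs <;> simp [min_left_comm]
  exact h.foldl_eq acc

theorem pv_two_eq_sorted (m M : Int) (pre : List Int) (hs : pre.Pairwise (· ≤ ·)) :
    (match pvB_firstGreater pre m with
     | some v => if v < M - 1 then min v 1000 else 1000
     | none => 1000) = pvA_two pre m M := by
  unfold pvA_two
  induction pre with
  | nil => simp [pvB_firstGreater]
  | cons x t ih =>
    rw [List.pairwise_cons] at hs
    obtain ⟨hx, ht⟩ := hs
    by_cases hmx : m < x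
    · rw [pvB_firstGreater, List.find?_cons_of_pos (by simpa using hmx)]
      simp only [List.foldl_cons]
      by_cases hxM : x < M - 1
      · rw [if_pos hxM, if_pos ⟨hmx, hxM⟩]
        rw [pv_two_stable m M t (min x 1000)
          (fun k hk _ => le_trans (min_le_left x 1000) (hx k hk))]
      · rw [if_neg hxM, if_neg (by omega)]
        rw [pv_two_stable m M t 1000 (fun k hk hkc => absurd hkc (by have := hx k hk; omega))]
    · rw [pvB_firstGreater, List.find?_cons_of_neg (by simpa using hmx)]
      simp only [List.foldl_cons, if_neg (show ¬(m < x ∧ x < M - 1) by omega)]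
      exact ih ht

theorem pv_two_eq (m M : Int) (pre l : List Int) (hp : pre.Perm l) (hs : pre.Pairwise (· ≤ ·)) :
    (match pvB_firstGreater pre m with
     | some v => if v < M - 1 then min v 1000 else 1000
     | none => 1000) = pvA_two l m M := by
  rw [pv_two_eq_sorted m M pre hs]
  unfold pvA_two
  exact pv_two_foldl_perm m M hp 1000

theorem pv_three_stable (m M : Int) (t : List Int) (acc : Int)
    (h : ∀ k ∈ t, m + 1 < k ∧ k < M → k ≤ acc) :
    t.foldl (fun three k => if m + 1 < k ∧ k < M then max k three else three) acc = acc := by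
  induction t with
  | nil => rfl
  | cons x s ih =>
    simp only [List.foldl_cons]
    by_cases hx : m + 1 < x ∧ x < M
    · rw [if_pos hx, max_eq_right (h x (by simp) hx)]
      exact ih (fun k hk hkc => h k (by simp [hk]) hkc)
    · rw [if_neg hx]; exact ih (fun k hk hkc => h k (by simp [hk]) hkc)

theorem pv_three_foldl_perm (m M : Int) {l₁ l₂ : List Int} (h : l₁.Perm l₂) (acc : Int) :
    l₁.foldl (fun three k => if m + 1 < k ∧ k < M then max k three else three) acc
      = l₂.foldl (fun three k => if m + 1 < k ∧ k < M then max k three else three) acc := by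
  letI : RightCommutative fun (three k : Int) => if m + 1 < k ∧ k < M then max k three else three := by
    constructor; intro a b c; dsimp; split_ifs <;> simp [max_left_comm]
  exact h.foldl_eq acc

-- induction over the reversed (descending) prefix
theorem pv_three_eq_desc (m M : Int) (r : List Int) (hs : r.Pairwise (fun a b => b ≤ a)) :
    (match r.find? (fun v => decide (v < M)) with
     | some u => if m + 1 < u then max u 0 else 0
     | none => 0) = pvA_three r m M := by
  unfold pvA_three
  induction r with
  | nil => simp
  | cons x t ih =>
    rw [List.pairwise_cons] at hs
    obtain ⟨hx, ht⟩ := hs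
    by_cases hxM : x < M
    · rw [List.find?_cons_of_pos (by simpa using hxM)]
      simp only [List.foldl_cons]
      by_cases hmx : m + 1 < x
      · rw [if_pos hmx, if_pos ⟨hmx, hxM⟩]
        rw [pv_three_stable m M t (max x 0)
          (fun k hk _ => le_trans (hx k hk) (le_max_left x 0))]
      · rw [if_neg hmx, if_neg (by omega)]
        rw [pv_three_stable m M t 0 (fun k hk hkc => absurd hkc (by have := hx k hk; omega))]
    · rw [List.find?_cons_of_neg (by simpa using hxM)]
      simp only [List.foldl_cons, if_neg (show ¬(m + 1 < x ∧ x < M) by omega)]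
      exact ih ht

theorem pv_three_eq (m M : Int) (pre l : List Int) (hp : pre.Perm l) (hs : pre.Pairwise (· ≤ ·)) :
    (match pvB_lastLess pre M with
     | some u => if m + 1 < u then max u 0 else 0
     | none => 0) = pvA_three l m M := by
  unfold pvB_lastLess
  rw [pv_three_eq_desc m M pre.reverse (by simpa [List.pairwise_reverse] using hs)]
  unfold pvA_three
  exact pv_three_foldl_perm m M (pre.reverse_perm.trans hp) 0

theorem pv_exists_eq_sorted (a b : Int) (suf : List Int) (hs : suf.Pairwise (· ≤ ·)) :
    (match pvB_firstGreater suf a with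
     | some w => decide (w < b)
     | none => false) = suf.any (fun k => decide (a < k) && decide (k < b)) := by
  induction suf with
  | nil => simp [pvB_firstGreater]
  | cons x t ih =>
    rw [List.pairwise_cons] at hs
    obtain ⟨hx, ht⟩ := hs
    by_cases hax : a < x
    · rw [pvB_firstGreater, List.find?_cons_of_pos (by simpa using hax)]
      by_cases hxb : x < b
      · simp [hax, hxb]
      · simp only [List.any_cons]
        have h2 : t.any (fun k => decide (a < k) && decide (k < b)) = false := by
          simp only [List.any_eq_false]
          intro k hk
          have := hx k hk
          simp; omega
        simp [h2, hxb]
    · rw [pvB_firstGreater, List.find?_cons_of_neg (by simpa using hax)]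
      simp only [List.any_cons, show decide (a < x) = false by simpa using hax, Bool.false_and,
        Bool.false_or]
      exact ih ht

theorem pv_exists_eq (a b : Int) (suf l : List Int) (hp : suf.Perm l) (hs : suf.Pairwise (· ≤ ·)) :
    (match pvB_firstGreater suf a with
     | some w => decide (w < b)
     | none => false) = l.any (fun k => decide (a < k) && decide (k < b)) := by
  rw [pv_exists_eq_sorted a b suf hs, Bool.eq_iff_iff]
  simp only [List.any_eq_true]
  exact ⟨fun ⟨x, hx, h⟩ => ⟨x, hp.mem_iff.mp hx, h⟩, fun ⟨x, hx, h⟩ => ⟨x, hp.mem_iff.mpr hx, h⟩⟩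

-- B's body = A's two return-False tests, given the sorted-multiset invariants
theorem pv_body_eq (perm : List Int) (s : Nat) (pre suf : List Int)
    (hpre : pre.Perm (perm.take s)) (hpw : pre.Pairwise (· ≤ ·))
    (hsuf : suf.Perm (perm.drop (s + 2))) (hsw : suf.Pairwise (· ≤ ·)) :
    pvB_body (PySem.List.pyGetD perm (s : Int) 0) (PySem.List.pyGetD perm ((s : Int) + 1) 0) pre suf
      = (pvA_bad1 perm (s : Int) || pvA_bad2 perm (s : Int)) := by
  have hto : PySem.List.slice perm none (some (s : Int)) = perm.take s :=
    PySem.List.slice_to_natCast perm s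
  have hfrom : PySem.List.slice perm (some ((s : Int) + 2)) none = perm.drop (s + 2) := by
    rw [show ((s : Int) + 2) = ((s + 2 : Nat) : Int) by push_cast; ring]
    exact PySem.List.slice_from_natCast perm (s + 2)
  unfold pvB_body pvA_bad1 pvA_bad2
  simp only [hto, hfrom]
  rw [pv_two_eq _ _ pre (perm.take s) hpre hpw,
      pv_three_eq _ _ pre (perm.take s) hpre hpw,
      pv_exists_eq _ _ suf (perm.drop (s + 2)) hsuf hsw,
      pv_exists_eq _ _ suf (perm.drop (s + 2)) hsuf hsw]
  have hcomm : (perm.drop (s + 2)).any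
      (fun k => decide (PySem.List.pyGetD perm ((s : Int)) 0 < k) &&
        decide (k < pvA_three (perm.take s) (PySem.List.pyGetD perm ((s : Int)) 0) (PySem.List.pyGetD perm ((s : Int) + 1) 0)))
      = (perm.drop (s + 2)).any
      (fun k => decide (k < pvA_three (perm.take s) (PySem.List.pyGetD perm ((s : Int)) 0) (PySem.List.pyGetD perm ((s : Int) + 1) 0)) &&
        decide (PySem.List.pyGetD perm ((s : Int)) 0 < k)) := by
    exact List.any_congr rfl (fun k => Bool.and_comm _ _)
  rw [hcomm]
  cases h1 : (perm.drop (s + 2)).any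
      (fun k => decide (pvA_two (perm.take s) (PySem.List.pyGetD perm ((s : Int)) 0) (PySem.List.pyGetD perm ((s : Int) + 1) 0) < k) &&
        decide (k < PySem.List.pyGetD perm ((s : Int) + 1) 0)) <;> simp

theorem pv_loop_eq (perm : List Int) (fuel : Nat) : ∀ (s : Nat) (pre suf : List Int),
    perm.length - s ≤ fuel →
    pre.Perm (perm.take s) → pre.Pairwise (· ≤ ·) →
    suf.Perm (perm.drop (s + 2)) → suf.Pairwise (· ≤ ·) →
    pvB_loop perm s pre suf = !(pvSpecAny perm s) := by
  induction fuel with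
  | zero =>
    intro s pre suf hf hpre hpw hsuf hsw
    rw [pvB_loop, dif_neg (by omega)]
    unfold pvSpecAny
    rw [show perm.length - 1 - s = 0 by omega]
    simp
  | succ fuel ih =>
    intro s pre suf hf hpre hpw hsuf hsw
    rw [pvB_loop]
    by_cases h : s + 1 < perm.length
    · rw [dif_pos h]
      have hlen : perm.length - 1 - s = (perm.length - 1 - (s + 1)) + 1 := by omega
      have hrange : pvSpecAny perm s
          = (pvStep perm s && (pvA_bad1 perm (s : Int) || pvA_bad2 perm (s : Int))
             || pvSpecAny perm (s + 1)) := by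
        unfold pvSpecAny
        rw [hlen, List.range'_succ, List.any_cons]
      -- invariants for the next iteration
      have hs_lt : s < perm.length := by omega
      have hgetD : PySem.List.pyGetD perm (s : Int) 0 = perm[s] := by
        rw [PySem.List.pyGetD_natCast]; exact List.getD_eq_getElem perm 0 hs_lt
      have hpre' : (pvB_insort pre (PySem.List.pyGetD perm (s : Int) 0)).Perm (perm.take (s + 1)) := by
        rw [hgetD]
        refine (pv_insort_perm pre perm[s]).trans ?_
        rw [List.take_add_one, List.getElem?_eq_getElem hs_lt]
        exact ((hpre.cons perm[s]).trans (List.perm_append_singleton _ _).symm).symm.symm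
      have hpw' := pv_insort_pairwise pre (PySem.List.pyGetD perm (s : Int) 0) hpw
      have hsuf' : (if s + 2 < perm.length then
            (PySem.List.remove? suf (PySem.List.pyGetD perm ((s : Int) + 2) 0)).getD suf
          else suf).Perm (perm.drop (s + 1 + 2)) := by
        by_cases h2 : s + 2 < perm.length
      -- s+2 in range: remove the departing head of the old suffix
        · rw [if_pos h2]
          have hg2 : PySem.List.pyGetD perm ((s : Int) + 2) 0 = perm[s + 2] := by
            rw [show ((s : Int) + 2) = ((s + 2 : Nat) : Int) by push_cast; ring,
              PySem.List.pyGetD_natCast]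
            exact List.getD_eq_getElem perm 0 h2
          have hdrop : perm.drop (s + 2) = perm[s + 2] :: perm.drop (s + 3) :=
            List.drop_eq_getElem_cons h2
          have hmem : perm[s + 2] ∈ suf := by
            rw [hsuf.mem_iff, hdrop]
            exact List.mem_cons_self ..
          rw [hg2, PySem.List.remove?_eq_some_erase suf _ hmem, Option.getD_some]
          have := hsuf.erase perm[s + 2]
          rw [hdrop, List.erase_cons_head] at this
          exact this
        · rw [if_neg h2]
          have h3 : perm.drop (s + 2) = [] := List.drop_eq_nil_of_le (by omega)
          have h4 : perm.drop (s + 1 + 2) = [] := List.drop_eq_nil_of_le (by omega)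
          rw [h4]
          rw [h3] at hsuf
          exact hsuf
      have hsw' : (if s + 2 < perm.length then
            (PySem.List.remove? suf (PySem.List.pyGetD perm ((s : Int) + 2) 0)).getD suf
          else suf).Pairwise (· ≤ ·) := by
        by_cases h2 : s + 2 < perm.length
        · rw [if_pos h2]
          cases hr : PySem.List.remove? suf (PySem.List.pyGetD perm ((s : Int) + 2) 0) with
          | none => simpa using hsw
          | some r =>
            have hmem : PySem.List.pyGetD perm ((s : Int) + 2) 0 ∈ suf := by
              by_contra hn
              rw [(PySem.List.remove?_eq_none_iff _ _).mpr hn] at hr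
              simp at hr
            rw [PySem.List.remove?_eq_some_erase suf _ hmem] at hr
            cases hr
            exact hsw.sublist (List.erase_sublist)
        · rw [if_neg h2]; exact hsw
      have hrec := ih (s + 1) _ _ (by omega) hpre' hpw' hsuf' hsw'
      rw [hrec, hrange]
      rw [pv_body_eq perm s pre suf hpre hpw hsuf hsw]
      unfold pvStep
      have hg1 : PySem.List.pyGetD perm (s : Int) 0 = perm.getD s 0 := PySem.List.pyGetD_natCast ..
      have hg2 : PySem.List.pyGetD perm ((s : Int) + 1) 0 = perm.getD (s + 1) 0 := by
        rw [show ((s : Int) + 1) = ((s + 1 : Nat) : Int) by push_cast; ring]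
        exact PySem.List.pyGetD_natCast ..
      rw [hg1, hg2]
      by_cases hstep : perm.getD s 0 < perm.getD (s + 1) 0 - 1
      · rw [if_pos hstep]
        have hd : decide (perm.getD s 0 < perm.getD (s + 1) 0 - 1) = true := decide_eq_true hstep
        rw [hd]
        cases hb : (pvA_bad1 perm (s : Int) || pvA_bad2 perm (s : Int)) <;> simp
      · rw [if_neg hstep]
        have hd : decide (perm.getD s 0 < perm.getD (s + 1) 0 - 1) = false := by
          simpa using hstep
        rw [hd]
        simp
    · rw [dif_neg h]
      unfold pvSpecAny
      rw [show perm.length - 1 - s = 0 by omega]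
      simp

-- ===== VERDICT (by name: the statement is the Claim_ definition above) =====
theorem isBaxter_spec : Claim_equal_isBaxter := by
  intro perm _
  unfold Spec_isBaxter isBaxter_alt
  rw [pvA_char]
  have hslice : PySem.List.slice perm (some 2) none = perm.drop 2 := by
    rw [show (2 : Int) = ((2 : Nat) : Int) by norm_num]
    exact PySem.List.slice_from_natCast perm 2
  rw [pv_loop_eq perm perm.length 0 [] _ (by omega) (by simp) (by simp) ?_ ?_]
  · rw [hslice]
    exact PySem.List.sorted_perm (perm.drop 2) id false
  · have := PySem.List.sorted_pairwise (PySem.List.slice perm (some 2) none) id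
    simpa using this
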